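-- pv_equiv track=rewrite | github.com/gyhd/python_study | 流星雨/3/PigScriptMS_new.py | parse
-- ===== SOURCE A (Python) =====
-- def parse(pixblock, palette, ind):
-- 	segments=[]
-- 	height=len(pixblock)
-- 	width=len(pixblock[0])
-- 	num,red,green,blue=palette[ind]
-- 	for j in range(height):
-- 		flag = 0
-- 		for i in range(width):
-- 			r,g,b,a = pixblock[j][i]
-- 			if (num<0 or (r//64)*16+(g//64)*4+(b//64)==num) and a>150:
-- 				pixblock[j][i] = (0,0,0,0)
-- 				if flag==0:
-- 					flag = 1
-- 					xl = i
-- 			else: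
-- 				if flag==1:
-- 					flag=0
-- 					xr = i-1
-- 					segments.append((j,xl,xr))
-- 		if flag==1:
-- 			xr=i
-- 			segments.append((j,xl,xr))
-- 	return segments, pixblock
-- ===== SOURCE B (Python) =====
-- # B: collect-then-segment decomposition. Like A, mutates pixblock's rows in place
-- # (same mutation as A); equivalence is about the return value.
-- def _runs(j, hits):
--     segs = []
--     if not hits:
--         return segs
--     start = prev = hits[0]
--     for i in hits[1:]:
--         if i != prev + 1:
--             segs.append((j, start, prev))
--             start = i
--         prev = i
--     segs.append((j, start, prev))
--     return segs
--
-- def parse(pixblock, palette, ind):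
--     width = len(pixblock[0])
--     num = palette[ind][0]
--     segments = []
--     for j, row in enumerate(pixblock):
--         hits = [i for i in range(width)
--                 if (num < 0 or (row[i][0] // 64) * 16 + (row[i][1] // 64) * 4
--                     + (row[i][2] // 64) == num) and row[i][3] > 150]
--         for i in hits:
--             row[i] = (0, 0, 0, 0)
--         segments.extend(_runs(j, hits))
--     return segments, pixblock
-- ===== Notes on version B (the rewrite author's own statement) =====
-- stated objective: simpler
-- what changed: Replaces A's flag-based run state machine (inline flag/xl/xr bookkeeping inside the pixel loop) by a per-row collect-then-segment decomposition: filter the matching column indices, zero them, then group consecutive indices into segments in a separate pass.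
import Mathlib
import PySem

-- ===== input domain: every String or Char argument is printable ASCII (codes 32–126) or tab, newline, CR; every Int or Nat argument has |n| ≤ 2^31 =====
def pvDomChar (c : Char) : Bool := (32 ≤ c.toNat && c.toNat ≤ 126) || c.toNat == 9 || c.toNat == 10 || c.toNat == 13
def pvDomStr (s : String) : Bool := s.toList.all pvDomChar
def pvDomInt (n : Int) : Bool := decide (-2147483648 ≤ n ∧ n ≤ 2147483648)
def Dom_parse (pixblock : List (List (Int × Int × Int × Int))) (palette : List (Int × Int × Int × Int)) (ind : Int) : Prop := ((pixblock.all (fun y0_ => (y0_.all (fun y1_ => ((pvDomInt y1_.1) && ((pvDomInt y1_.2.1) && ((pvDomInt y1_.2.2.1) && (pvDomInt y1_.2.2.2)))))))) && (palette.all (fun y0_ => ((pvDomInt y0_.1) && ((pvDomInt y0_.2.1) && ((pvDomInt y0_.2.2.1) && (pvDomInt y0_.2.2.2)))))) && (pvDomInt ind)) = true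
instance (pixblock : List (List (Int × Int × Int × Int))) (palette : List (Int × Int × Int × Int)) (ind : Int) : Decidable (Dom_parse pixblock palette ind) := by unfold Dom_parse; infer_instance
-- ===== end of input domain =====

-- B replaces A's flag-based run state machine by a collect-then-segment decomposition
-- (per row: filter the matching columns, zero them, then group consecutive indices);
-- same O(width·height) cost, simpler control flow. Both A and B mutate pixblock's rows
-- in place in Python (the same mutation); the equivalence proved is about the return value.

-- ===== PORT A =====
def pvZ : Int × Int × Int × Int := (0, 0, 0, 0)

-- the pixel predicate '(num<0 or (r//64)*16+(g//64)*4+(b//64)==num) and a>150'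
def pvMatch (num : Int) (p : Int × Int × Int × Int) : Bool :=
  (decide (num < 0) || decide (PySem.Int.floordiv p.1 64 * 16 + PySem.Int.floordiv p.2.1 64 * 4 + PySem.Int.floordiv p.2.2.1 64 = num)) && decide (p.2.2.2 > 150)

-- body of A's inner loop: state (segments, row, flag, xl); reading/writing 'row' is
-- Python's pixblock[j][i] (the row object IS pixblock[j] while processing row j)
def pvInnerA (num : Int) (j : Nat)
    (st : List (Int × Int × Int) × List (Int × Int × Int × Int) × Int × Int) (i : Nat) :
    List (Int × Int × Int) × List (Int × Int × Int × Int) × Int × Int :=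
  let p := st.2.1.getD i pvZ
  if pvMatch num p then
    let row := st.2.1.set i pvZ
    if st.2.2.1 = 0 then (st.1, row, 1, (i : Int)) else (st.1, row, st.2.2.1, st.2.2.2)
  else
    if st.2.2.1 = 1 then (st.1 ++ [((j : Int), st.2.2.2, (i : Int) - 1)], st.2.1, 0, st.2.2.2)
    else st

-- A's per-row work: the inner loop plus the trailing 'if flag==1' flush
-- (when flag==1 the leftover loop variable i equals width-1)
def pvRowA (num : Int) (j width : Nat) (segs : List (Int × Int × Int))
    (row : List (Int × Int × Int × Int)) :
    List (Int × Int × Int) × List (Int × Int × Int × Int) :=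
  let e := (List.range width).foldl (pvInnerA num j) (segs, row, 0, 0)
  ((if e.2.2.1 = 1 then e.1 ++ [((j : Int), e.2.2.2, (width : Int) - 1)] else e.1), e.2.1)

def pvOuterA (num : Int) (width : Nat)
    (st : List (Int × Int × Int) × List (List (Int × Int × Int × Int))) (j : Nat) :
    List (Int × Int × Int) × List (List (Int × Int × Int × Int)) :=
  let e := pvRowA num j width st.1 (st.2.getD j [])
  (e.1, st.2.set j e.2)

def parse (pixblock : List (List (Int × Int × Int × Int))) (palette : List (Int × Int × Int × Int)) (ind : Int) : (List (Int × Int × Int)) × (List (List (Int × Int × Int × Int))) :=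
  let height := pixblock.length
  let width := (pixblock.headD []).length   -- len(pixblock[0]); Pre_ excludes pixblock == []
  let num := ((PySem.List.pyGet? palette ind).getD pvZ).1   -- palette[ind]; Pre_ excludes out-of-range ind
  (List.range height).foldl (pvOuterA num width) ([], pixblock)

-- ===== PORT B =====
-- step of _runs's loop: state (segs, start, prev)
def pvRunStep (j : Int) (st : List (Int × Int × Int) × Int × Int) (i : Nat) :
    List (Int × Int × Int) × Int × Int :=
  if (i : Int) ≠ st.2.2 + 1 then (st.1 ++ [(j, st.2.1, st.2.2)], (i : Int), (i : Int))
  else (st.1, st.2.1, (i : Int))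

-- _runs: group the sorted hit indices into maximal consecutive segments
def pvRuns (j : Int) (hits : List Nat) : List (Int × Int × Int) :=
  match hits with
  | [] => []
  | h :: t =>
    let e := t.foldl (pvRunStep j) ([], (h : Int), (h : Int))
    e.1 ++ [(j, e.2.1, e.2.2)]

-- body of B's loop over enumerate(pixblock)
def pvOuterB (num : Int) (width : Nat)
    (st : List (Int × Int × Int) × List (List (Int × Int × Int × Int)))
    (jr : Int × List (Int × Int × Int × Int)) :
    List (Int × Int × Int) × List (List (Int × Int × Int × Int)) :=
  let hits := (List.range width).filter (fun i => pvMatch num (jr.2.getD i pvZ))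
  let row := hits.foldl (fun r i => r.set i pvZ) jr.2
  (st.1 ++ pvRuns jr.1 hits, st.2 ++ [row])

def parse_alt (pixblock : List (List (Int × Int × Int × Int))) (palette : List (Int × Int × Int × Int)) (ind : Int) : (List (Int × Int × Int)) × (List (List (Int × Int × Int × Int))) :=
  let width := (pixblock.headD []).length
  let num := ((PySem.List.pyGet? palette ind).getD pvZ).1
  (PySem.List.enumerate pixblock 0).foldl (pvOuterB num width) ([], [])

-- ===== PRECONDITION & SPEC =====
-- Pre_ excludes exactly the inputs where the Python A raises: empty pixblock (pixblock[0]
-- → IndexError), palette index out of range (IndexError), and rows shorter than the first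
-- row (pixblock[j][i] → IndexError inside the loop).
def Pre_parse (pixblock : List (List (Int × Int × Int × Int))) (palette : List (Int × Int × Int × Int)) (ind : Int) : Prop :=
  pixblock ≠ [] ∧ PySem.Raise.InRange palette.length ind ∧
    ∀ row ∈ pixblock, (pixblock.headD []).length ≤ row.length
instance (pixblock : List (List (Int × Int × Int × Int))) (palette : List (Int × Int × Int × Int)) (ind : Int) : Decidable (Pre_parse pixblock palette ind) := by unfold Pre_parse; infer_instance

def pvWitness_parse : (List (List (Int × Int × Int × Int))) × (List (Int × Int × Int × Int)) × Int :=
  ([[(0, 0, 0, 200), (100, 0, 0, 200)]], [(-1, 0, 0, 0)], 0)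

def Spec_parse (pixblock : List (List (Int × Int × Int × Int))) (palette : List (Int × Int × Int × Int)) (ind : Int) (out : (List (Int × Int × Int)) × (List (List (Int × Int × Int × Int)))) : Prop := out = parse_alt pixblock palette ind
instance (pixblock : List (List (Int × Int × Int × Int))) (palette : List (Int × Int × Int × Int)) (ind : Int) (out : (List (Int × Int × Int)) × (List (List (Int × Int × Int × Int)))) : Decidable (Spec_parse pixblock palette ind out) := by unfold Spec_parse; infer_instance

-- ===== CLAIM (what is proved, stated in full; the proofs are below) =====
def Claim_equal_parse : Prop := ∀ (pixblock : List (List (Int × Int × Int × Int))) (palette : List (Int × Int × Int × Int)) (ind : Int), Dom_parse pixblock palette ind → Pre_parse pixblock palette ind → Spec_parse pixblock palette ind (parse pixblock palette ind)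

-- ===== LEMMAS AND PROOFS =====

-- the matching columns of 'row' among indices [a, a+n)
def pvHits (num : Int) (row : List (Int × Int × Int × Int)) (a n : Nat) : List Nat :=
  (List.range' a n).filter (fun i => pvMatch num (row.getD i pvZ))

def pvSetAll (row : List (Int × Int × Int × Int)) (l : List Nat) : List (Int × Int × Int × Int) :=
  l.foldl (fun r i => r.set i pvZ) row

-- recursive form of _runs with an open run (start, prev)
def pvERuns (j start prev : Int) : List Nat → List (Int × Int × Int)
  | [] => [(j, start, prev)]
  | i :: t => if (i : Int) ≠ prev + 1 then (j, start, prev) :: pvERuns j (i : Int) (i : Int) t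
              else pvERuns j start (i : Int) t

def pvRuns0 (j : Int) : List Nat → List (Int × Int × Int)
  | [] => []
  | h :: t => pvERuns j (h : Int) (h : Int) t

def pvZeroRow (num : Int) (width : Nat) (row : List (Int × Int × Int × Int)) :
    List (Int × Int × Int × Int) :=
  pvSetAll row (pvHits num row 0 width)

def pvSegsAll (num : Int) (width : Nat) : Nat → List (List (Int × Int × Int × Int)) → List (Int × Int × Int)
  | _, [] => []
  | j0, row :: t => pvRuns0 (j0 : Int) (pvHits num row 0 width) ++ pvSegsAll num width (j0 + 1) t

def pvUpdAll (num : Int) (width : Nat) :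
    List (List (Int × Int × Int × Int)) → List (List (Int × Int × Int × Int)) → Nat →
    List (List (Int × Int × Int × Int))
  | [], block, _ => block
  | row :: t, block, j0 => pvUpdAll num width t (block.set j0 (pvZeroRow num width row)) (j0 + 1)

-- _runs's fold equals the recursive grouping
theorem pvRuns_fold_eq (j : Int) (t : List Nat) :
    ∀ (segs : List (Int × Int × Int)) (start prev : Int),
      (let e := t.foldl (pvRunStep j) (segs, start, prev); e.1 ++ [(j, e.2.1, e.2.2)])
        = segs ++ pvERuns j start prev t := by
  induction t with
  | nil => intro segs start prev; simp [pvERuns]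
  | cons i t ih =>
    intro segs start prev
    simp only [List.foldl_cons, pvRunStep, pvERuns]
    by_cases h : (i : Int) ≠ prev + 1
    · simp only [if_pos h]
      rw [ih]
      simp
    · simp only [if_neg h]
      rw [ih]

theorem pvRuns_eq (j : Int) (l : List Nat) : pvRuns j l = pvRuns0 j l := by
  cases l with
  | nil => rfl
  | cons h t =>
    show (let e := t.foldl (pvRunStep j) ([], (h : Int), (h : Int)); e.1 ++ [(j, e.2.1, e.2.2)]) = _
    rw [pvRuns_fold_eq]
    rfl

-- getD is unchanged by a set at another index
theorem getD_set_ne {α : Type} (l : List α) (k i : Nat) (v d : α) (h : k ≠ i) :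
    (l.set k v).getD i d = l.getD i d := by
  simp [List.getD, List.getElem?_set_ne h]

-- eRuns with an open run whose next hits all jump: closes the run first
theorem pvERuns_gap (j start prev : Int) (t : List Nat) (a : Nat)
    (ht : ∀ i ∈ t, a + 1 ≤ i) (hprev : prev + 1 ≤ (a : Int)) :
    pvERuns j start prev t = (j, start, prev) :: pvRuns0 j t := by
  cases t with
  | nil => rfl
  | cons h t' =>
    have : (h : Int) ≠ prev + 1 := by
      have := ht h (List.mem_cons_self)
      omega
    simp [pvERuns, pvRuns0, this]

-- A's trailing flush of an open run, over the index window [a, a+n)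
def pvFlush (j a n : Nat)
    (e : List (Int × Int × Int) × List (Int × Int × Int × Int) × Int × Int) :
    List (Int × Int × Int) × List (Int × Int × Int × Int) :=
  ((if e.2.2.1 = 1 then e.1 ++ [((j : Int), e.2.2.2, ((a + n : Nat) : Int) - 1)] else e.1), e.2.1)

-- the core row lemma: A's flag state machine over [a, a+n), then the trailing flush,
-- equals filter-then-group; simultaneously for flag = 0 and flag = 1
theorem pvInner_spec (num : Int) (j : Nat) (row0 : List (Int × Int × Int × Int)) :
    ∀ (n a : Nat) (segs : List (Int × Int × Int)) (xl : Int)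
      (r : List (Int × Int × Int × Int)),
      (∀ i, a ≤ i → r.getD i pvZ = row0.getD i pvZ) →
      pvFlush j a n ((List.range' a n).foldl (pvInnerA num j) (segs, r, 0, xl))
          = (segs ++ pvRuns0 (j : Int) (pvHits num row0 a n), pvSetAll r (pvHits num row0 a n))
      ∧ pvFlush j a n ((List.range' a n).foldl (pvInnerA num j) (segs, r, 1, xl))
          = (segs ++ pvERuns (j : Int) xl ((a : Int) - 1) (pvHits num row0 a n), pvSetAll r (pvHits num row0 a n)) := by
  intro n
  induction n with
  | zero =>
    intro a segs xl r H
    constructor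
    · simp [pvFlush, pvHits, pvRuns0, pvSetAll]
    · simp [pvFlush, pvHits, pvERuns, pvSetAll]
  | succ n ih =>
    intro a segs xl r H
    have hread : r.getD a pvZ = row0.getD a pvZ := H a (le_refl a)
    have H' : ∀ i, a + 1 ≤ i → (r.set a pvZ).getD i pvZ = row0.getD i pvZ := by
      intro i hi; rw [getD_set_ne _ _ _ _ _ (by omega)]; exact H i (by omega)
    have H'' : ∀ i, a + 1 ≤ i → r.getD i pvZ = row0.getD i pvZ := fun i hi => H i (by omega)
    have hmem : ∀ i ∈ pvHits num row0 (a + 1) n, a + 1 ≤ i := by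
      intro i hi
      have h1 := (List.mem_filter.mp hi).1
      exact (List.mem_range'_1.mp h1).1
    have hhits : pvHits num row0 a (n + 1)
        = if pvMatch num (row0.getD a pvZ) then a :: pvHits num row0 (a + 1) n
          else pvHits num row0 (a + 1) n := by
      simp [pvHits, List.range'_succ, List.filter_cons]
    have hflush : ∀ st, pvFlush j a (n + 1) st = pvFlush j (a + 1) n st := by
      intro st; simp [pvFlush, show a + (n + 1) = (a + 1) + n by omega]
    constructor
    · rw [List.range'_succ, List.foldl_cons]
      by_cases hp : pvMatch num (row0.getD a pvZ)
      · have hp2 : pvMatch num (row0[a]?.getD pvZ) = true := hp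
        rw [show pvInnerA num j (segs, r, 0, xl) a = (segs, r.set a pvZ, 1, (a : Int)) by
          simp only [pvInnerA]; rw [hread]; simp [hp2]]
        rw [hflush, (ih (a + 1) segs (a : Int) (r.set a pvZ) H').2, hhits]
        rw [show ((a + 1 : Nat) : Int) - 1 = (a : Int) by push_cast; ring]
        simp [hp2, pvRuns0, pvSetAll]
      · have hp2 : ¬(pvMatch num (row0[a]?.getD pvZ) = true) := hp
        rw [show pvInnerA num j (segs, r, 0, xl) a = (segs, r, 0, xl) by
          simp only [pvInnerA]; rw [hread]; simp [hp2]]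
        rw [hflush, (ih (a + 1) segs xl r H'').1, hhits]
        simp [hp2]
    · rw [List.range'_succ, List.foldl_cons]
      by_cases hp : pvMatch num (row0.getD a pvZ)
      · have hp2 : pvMatch num (row0[a]?.getD pvZ) = true := hp
        rw [show pvInnerA num j (segs, r, 1, xl) a = (segs, r.set a pvZ, 1, xl) by
          simp only [pvInnerA]; rw [hread]; simp [hp2]]
        rw [hflush, (ih (a + 1) segs xl (r.set a pvZ) H').2, hhits]
        rw [show ((a + 1 : Nat) : Int) - 1 = (a : Int) by push_cast; ring]
        have : pvERuns (j : Int) xl ((a : Int) - 1) (a :: pvHits num row0 (a + 1) n)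
            = pvERuns (j : Int) xl (a : Int) (pvHits num row0 (a + 1) n) := by
          simp [pvERuns]
        simp [hp2, this, pvSetAll]
      · have hp2 : ¬(pvMatch num (row0[a]?.getD pvZ) = true) := hp
        rw [show pvInnerA num j (segs, r, 1, xl) a
            = (segs ++ [((j : Int), xl, (a : Int) - 1)], r, 0, xl) by
          simp only [pvInnerA]; rw [hread]; simp [hp2]]
        rw [hflush, (ih (a + 1) (segs ++ [((j : Int), xl, (a : Int) - 1)]) xl r H'').1, hhits, if_neg hp]
        rw [pvERuns_gap (j : Int) xl ((a : Int) - 1) _ a hmem (by omega)]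
        simp

-- A's per-row function computes filter-then-group on the whole row
theorem pvRowA_spec (num : Int) (j width : Nat) (segs : List (Int × Int × Int))
    (row : List (Int × Int × Int × Int)) :
    pvRowA num j width segs row
      = (segs ++ pvRuns0 (j : Int) (pvHits num row 0 width), pvZeroRow num width row) := by
  have h := (pvInner_spec num j row width 0 segs 0 row (fun _ _ => rfl)).1
  unfold pvFlush at h
  simp only [Nat.zero_add] at h
  unfold pvRowA pvZeroRow
  rw [List.range_eq_range']
  exact h

-- A's outer loop
theorem pvOuterA_spec (num : Int) (width : Nat) :
    ∀ (rows block : List (List (Int × Int × Int × Int))) (j0 : Nat)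
      (segs : List (Int × Int × Int)),
      (∀ k, k < rows.length → block.getD (j0 + k) [] = rows.getD k []) →
      (List.range' j0 rows.length).foldl (pvOuterA num width) (segs, block)
        = (segs ++ pvSegsAll num width j0 rows, pvUpdAll num width rows block j0) := by
  intro rows
  induction rows with
  | nil => intro block j0 segs _; simp [pvSegsAll, pvUpdAll]
  | cons row t ih =>
    intro block j0 segs H
    simp only [List.length_cons, List.range'_succ, List.foldl_cons]
    have h0 : block.getD j0 [] = row := by
      have := H 0 (by simp)
      simpa using this
    rw [show pvOuterA num width (segs, block) j0
          = (segs ++ pvRuns0 (j0 : Int) (pvHits num row 0 width), block.set j0 (pvZeroRow num width row)) by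
        simp only [pvOuterA, pvRowA_spec, h0]]
    rw [ih _ _ _ (by
      intro k hk
      rw [show j0 + 1 + k = j0 + (1 + k) by ring]
      rw [getD_set_ne _ _ _ _ _ (by omega)]
      have := H (1 + k) (by simp only [List.length_cons]; omega)
      simpa [Nat.add_comm] using this)]
    simp [pvSegsAll, pvUpdAll]

-- B's outer loop
theorem pvOuterB_spec (num : Int) (width : Nat) :
    ∀ (rows : List (List (Int × Int × Int × Int))) (j0 : Nat)
      (segs : List (Int × Int × Int)) (nb : List (List (Int × Int × Int × Int))),
      (PySem.List.enumerate rows (j0 : Int)).foldl (pvOuterB num width) (segs, nb)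
        = (segs ++ pvSegsAll num width j0 rows, nb ++ rows.map (pvZeroRow num width)) := by
  intro rows
  induction rows with
  | nil => intro j0 segs nb; simp [PySem.List.enumerate_nil, pvSegsAll]
  | cons row t ih =>
    intro j0 segs nb
    rw [PySem.List.enumerate_cons]
    rw [show ((j0 : Int) + 1) = ((j0 + 1 : Nat) : Int) by push_cast; ring]
    simp only [List.foldl_cons]
    rw [show pvOuterB num width (segs, nb) ((j0 : Int), row)
          = (segs ++ pvRuns (j0 : Int) (pvHits num row 0 width), nb ++ [pvZeroRow num width row]) by
        simp [pvOuterB, pvHits, pvZeroRow, pvSetAll, List.range_eq_range']]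
    rw [ih]
    simp [pvSegsAll, pvRuns_eq]

theorem pvUpdAll_map (num : Int) (width : Nat) :
    ∀ (rows pre : List (List (Int × Int × Int × Int))),
      pvUpdAll num width rows (pre ++ rows) pre.length = pre ++ rows.map (pvZeroRow num width) := by
  intro rows
  induction rows with
  | nil => intro pre; simp [pvUpdAll]
  | cons row t ih =>
    intro pre
    show pvUpdAll num width t ((pre ++ row :: t).set pre.length (pvZeroRow num width row)) (pre.length + 1) = _
    have hset : (pre ++ row :: t).set pre.length (pvZeroRow num width row)
        = (pre ++ [pvZeroRow num width row]) ++ t := by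
      rw [List.set_append_right _ _ (le_refl _)]
      simp
    rw [hset, show pre.length + 1 = (pre ++ [pvZeroRow num width row]).length by simp, ih]
    simp

-- ===== VERDICT (by name: the statement is the Claim_ definition above) =====
theorem parse_spec : Claim_equal_parse := by
  intro pixblock palette ind _ _
  unfold Spec_parse
  show parse pixblock palette ind = parse_alt pixblock palette ind
  simp only [parse, parse_alt]
  rw [List.range_eq_range']
  rw [pvOuterA_spec _ _ pixblock pixblock 0 [] (by intro k _; simp)]
  rw [show (0 : Int) = ((0 : Nat) : Int) from rfl, pvOuterB_spec _ _ pixblock 0 [] []]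
  rw [show pvUpdAll ((PySem.List.pyGet? palette ind).getD pvZ).1 (pixblock.headD []).length pixblock pixblock 0
        = pvUpdAll ((PySem.List.pyGet? palette ind).getD pvZ).1 (pixblock.headD []).length pixblock ([] ++ pixblock) ([] : List (List (Int × Int × Int × Int))).length from rfl,
      pvUpdAll_map]
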